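-- pv_equiv track=rewrite | github.com/greenstar1151/Baekjoon | 1300_K번째 수/1300_K번째 수_210214.py | count_under_mid
-- ===== SOURCE A (Python) =====
-- def count_under_mid(n, N): # 1번 열부터 순회하며 n ** 2 이하의 수의 개수를 세기
--     counter = 1 # n행 n열의 숫자 1개 더하기
--     for i in range(1, n):
--         if i * N <= n ** 2: # i열 N행이 n ** 2 보다 작다면 (i행 || i열)의 숫자들은 n ** 2 이하임이 보장
--             counter += 2 * (N - (i - 1)) - 1
--         else: # 그렇지 않다면 i열에서 n ** 2 이하의 숫자들만 세기
--             counter += 2 * ((n ** 2 // i) - (i - 1)) - 1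
--     return counter
-- ===== SOURCE B (Python) =====
-- def count_under_mid(n, N):
--     # closed-form prefix (arithmetic series) + short tail loop of floor-division terms
--     m = n - 1 if N <= 0 else min(n - 1, n * n // N)
--     total = 1 + m * (2 * N - m) if m > 0 else 1
--     for i in range(m + 1, n):
--         total += 2 * (n * n // i - (i - 1)) - 1
--     return total
-- ===== Notes on version B (the rewrite author's own statement) =====
-- stated objective: faster
-- what changed: The prefix of loop iterations where i*N <= n*n (i up to m = min(n-1, n*n//N)) is collapsed into the closed-form arithmetic-series value 1 + m*(2*N - m); only the floor-division tail i in [m+1, n-1] is still looped.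
import Mathlib
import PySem

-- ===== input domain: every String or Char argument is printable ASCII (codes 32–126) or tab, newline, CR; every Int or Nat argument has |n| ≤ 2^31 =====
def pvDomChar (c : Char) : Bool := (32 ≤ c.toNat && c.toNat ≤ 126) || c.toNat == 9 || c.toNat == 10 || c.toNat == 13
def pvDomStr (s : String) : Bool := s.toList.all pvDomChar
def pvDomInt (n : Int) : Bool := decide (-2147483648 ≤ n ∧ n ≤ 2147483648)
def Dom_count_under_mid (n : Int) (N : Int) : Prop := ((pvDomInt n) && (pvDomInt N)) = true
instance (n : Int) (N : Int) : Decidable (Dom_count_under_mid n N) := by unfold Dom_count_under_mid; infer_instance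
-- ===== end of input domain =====

-- B replaces the arithmetic-progression prefix of A's loop by its closed-form sum; only the floor-division tail is looped.
-- ===== PORT A =====
def count_under_mid (n : Int) (N : Int) : Int :=
  (PySem.List.pyRange 1 n 1).foldl
    (fun counter i =>
      if i * N ≤ n ^ 2 then counter + (2 * (N - (i - 1)) - 1)
      else counter + (2 * (PySem.Int.floordiv (n ^ 2) i - (i - 1)) - 1)) 1

-- ===== PORT B =====
def count_under_mid_alt (n : Int) (N : Int) : Int :=
  let m : Int := if N ≤ 0 then n - 1 else min (n - 1) (PySem.Int.floordiv (n * n) N)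
  let total : Int := if 0 < m then 1 + m * (2 * N - m) else 1
  (PySem.List.pyRange (m + 1) n 1).foldl
    (fun total i => total + (2 * (PySem.Int.floordiv (n * n) i - (i - 1)) - 1)) total

-- ===== PRECONDITION & SPEC =====
def Spec_count_under_mid (n : Int) (N : Int) (out : Int) : Prop := out = count_under_mid_alt n N
instance (n : Int) (N : Int) (out : Int) : Decidable (Spec_count_under_mid n N out) := by unfold Spec_count_under_mid; infer_instance

-- ===== CLAIM (what is proved, stated in full; the proofs are below) =====
def Claim_equal_count_under_mid : Prop := ∀ (n : Int) (N : Int), Dom_count_under_mid n N → Spec_count_under_mid n N (count_under_mid n N)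

-- ===== LEMMAS AND PROOFS =====

-- closed-form of the arithmetic-series prefix: fold of (2*(N-(i-1))-1) over [1..k]
theorem pv_arith_fold (N : Int) (k : Nat) (acc : Int) :
    (PySem.List.pyRange 1 ((k : Int) + 1) 1).foldl
      (fun c i => c + (2 * (N - (i - 1)) - 1)) acc = acc + (k : Int) * (2 * N - (k : Int)) := by
  induction k generalizing acc with
  | zero =>
    rw [PySem.List.pyRange_one_eq_nil (by omega)]; simp
  | succ k ih =>
    rw [show ((k + 1 : Nat) : Int) + 1 = ((k : Int) + 1) + 1 by push_cast; ring,
        PySem.List.pyRange_one_succ_right (by omega), List.foldl_append, ih]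
    simp only [List.foldl]
    push_cast; ring

theorem count_under_mid_eq (n N : Int) : count_under_mid n N = count_under_mid_alt n N := by
  unfold count_under_mid count_under_mid_alt
  dsimp only
  have hS2 : n ^ 2 = n * n := by ring
  rw [hS2]
  set S : Int := n * n with hS
  have hSnn : 0 ≤ S := mul_self_nonneg n
  set q : Int := PySem.Int.floordiv S N with hq
  have hq0 : 0 < N → 0 ≤ q := by
    intro hN
    rw [hq, PySem.Int.floordiv_eq_ediv_of_pos hN]
    exact Int.ediv_nonneg hSnn (by omega)
  set m : Int := if N ≤ 0 then n - 1 else min (n - 1) q with hm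
  by_cases hn : n ≤ 1
  · -- both loops are empty
    have hm1 : m = n - 1 := by
      by_cases hN : N ≤ 0
      · rw [hm, if_pos hN]
      · have := hq0 (by omega)
        rw [hm, if_neg hN, min_eq_left (by omega)]
    rw [PySem.List.pyRange_one_eq_nil hn, PySem.List.pyRange_one_eq_nil (by omega)]
    simp only [List.foldl_nil]
    rw [if_neg (by omega)]
  · -- n ≥ 2
    push_neg at hn
    have hm0 : 0 ≤ m := by
      by_cases hN : N ≤ 0
      · rw [hm, if_pos hN]; omega
      · have := hq0 (by omega)
        rw [hm, if_neg hN]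
        omega
    have hmn : m ≤ n - 1 := by
      by_cases hN : N ≤ 0
      · rw [hm, if_pos hN]
      · rw [hm, if_neg hN]; exact min_le_left _ _
    have htrue : ∀ i : Int, 1 ≤ i → i ≤ m → i * N ≤ S := by
      intro i h1 h2
      by_cases hN : N ≤ 0
      · nlinarith
      · push_neg at hN
        have hiq : i ≤ q := by
          rw [hm, if_neg (by omega)] at h2
          have := min_le_right (n - 1) q
          by_cases h : q ≤ n - 1
          · rw [min_eq_right h] at h2; omega
          · have := hq0 hN; omega
        have hqN : q * N ≤ S :=
          ((PySem.Int.floordiv_eq_iff_of_pos hN).1 hq.symm).1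
        nlinarith
    have hfalse : ∀ i : Int, m + 1 ≤ i → i < n → ¬ i * N ≤ S := by
      intro i h1 h2
      by_cases hN : N ≤ 0
      · exfalso; rw [hm, if_pos hN] at h1; omega
      · push_neg at hN
        have hiq : q < i := by
          rw [hm, if_neg (by omega)] at h1
          by_cases h : q ≤ n - 1
          · rw [min_eq_right h] at h1; omega
          · rw [min_eq_left (by omega)] at h1; omega
        have hqN : S < (q + 1) * N :=
          ((PySem.Int.floordiv_eq_iff_of_pos hN).1 hq.symm).2
        have : (q + 1) * N ≤ i * N := by nlinarith
        omega
    -- split A's range at m + 1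
    rw [PySem.List.pyRange_one_append 1 (m + 1) n (by omega) (by omega), List.foldl_append]
    -- prefix: every condition is true
    have hpre : (PySem.List.pyRange 1 (m + 1) 1).foldl
        (fun counter i =>
          if i * N ≤ S then counter + (2 * (N - (i - 1)) - 1)
          else counter + (2 * (PySem.Int.floordiv S i - (i - 1)) - 1)) 1
        = (PySem.List.pyRange 1 (m + 1) 1).foldl
            (fun c i => c + (2 * (N - (i - 1)) - 1)) 1 := by
      apply PySem.List.foldl_congr_mem
      intro acc x hx
      rw [PySem.List.mem_pyRange_one] at hx
      rw [if_pos (htrue x hx.1 (by omega))]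
    have hmk : m + 1 = ((m.toNat : Int)) + 1 := by omega
    rw [hpre, hmk, pv_arith_fold N m.toNat 1]
    -- tail: every condition is false
    have hpost : ∀ init : Int, (PySem.List.pyRange (m + 1) n 1).foldl
        (fun counter i =>
          if i * N ≤ S then counter + (2 * (N - (i - 1)) - 1)
          else counter + (2 * (PySem.Int.floordiv S i - (i - 1)) - 1)) init
        = (PySem.List.pyRange (m + 1) n 1).foldl
            (fun total i => total + (2 * (PySem.Int.floordiv S i - (i - 1)) - 1)) init := by
      intro init
      apply PySem.List.foldl_congr_mem
      intro acc x hx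
      rw [PySem.List.mem_pyRange_one] at hx
      rw [if_neg (hfalse x hx.1 hx.2)]
    have hcast : ((m.toNat : Int)) = m := by omega
    rw [hcast, hpost]
    congr 1
    -- starting accumulators agree
    by_cases hmpos : 0 < m
    · rw [if_pos hmpos]
    · rw [if_neg hmpos]
      have h0 : m = 0 := by omega
      rw [h0]; ring

-- ===== VERDICT (by name: the statement is the Claim_ definition above) =====
theorem count_under_mid_spec : Claim_equal_count_under_mid := by
  intro n N _
  unfold Spec_count_under_mid
  exact count_under_mid_eq n N
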